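-- pv_equiv track=rewrite | github.com/inyong37/Study | V. Algorithm/iii. Codility/A. Lessons/Lesson15_01_CountDistinctSlices.py | solution
-- ===== SOURCE A (Python) =====
-- def solution(M, A):
--     N = len(A)
--     slc = []
--     cnt = 1
--     for idx in range(0, N):
--         # start distinct slice
--         if len(slc) == 0:
--             slc.append(A[idx])
--         else:
--             if A[idx] in slc:
--                 # plus count
--                 plus = 1
--                 for i in range(1, len(slc)+1):
--                     plus *= i
--                 cnt += plus
--                 # clean distinct slice
--                 slc = []
--                 slc.append(A[idx])
--             else:
--                 slc.append(A[idx])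
--
--     # plus count
--     plus = 1
--     for i in range(1, len(slc)+1):
--         plus *= i
--     cnt += plus
--
--     return cnt
-- ===== SOURCE B (Python) =====
-- def _fact(n):
--     return 1 if n == 0 else n * _fact(n - 1)
--
--
-- def solution(M, A):
--     # Pass 1: materialize the lengths of the distinct runs (the repeated
--     # element restarts the run as its single member).
--     lengths = []
--     seen = set()
--     run = 0
--     for x in A:
--         if x in seen:
--             lengths.append(run)
--             seen = {x}
--             run = 1
--         else:
--             seen.add(x)
--             run += 1
--     lengths.append(run)
--     # Pass 2: sum the factorials of the run lengths.
--     return 1 + sum(_fact(L) for L in lengths)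
-- ===== Notes on version B (the rewrite author's own statement) =====
-- stated objective: alternative
-- what changed: B splits A's interleaved scan into two passes: one scan using a set to record the distinct-run lengths (replacing A's linear membership scan of the run list and its inner factorial loop), then a separate pass summing recursive factorials of those lengths.
import Mathlib
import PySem

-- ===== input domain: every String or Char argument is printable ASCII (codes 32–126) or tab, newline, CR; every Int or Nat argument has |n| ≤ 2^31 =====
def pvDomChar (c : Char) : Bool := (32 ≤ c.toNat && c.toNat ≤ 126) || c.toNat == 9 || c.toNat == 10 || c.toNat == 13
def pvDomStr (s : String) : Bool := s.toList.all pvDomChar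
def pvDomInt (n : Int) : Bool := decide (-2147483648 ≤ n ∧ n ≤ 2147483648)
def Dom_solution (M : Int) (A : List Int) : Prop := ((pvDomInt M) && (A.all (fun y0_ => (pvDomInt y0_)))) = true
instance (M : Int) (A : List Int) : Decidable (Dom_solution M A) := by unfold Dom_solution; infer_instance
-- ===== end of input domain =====

-- B restructures A's single interleaved run/factorial loop into two passes
-- (collect run lengths with a set, then sum recursive factorials); same value everywhere.

-- ===== PORT A =====
-- loop body of A's for-loop over indices (state: current distinct slice `slc`, accumulator `cnt`)
def stepA (st : List Int × Int) (x : Int) : List Int × Int :=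
  if st.1.length = 0 then
    (st.1 ++ [x], st.2)
  else if x ∈ st.1 then
    ([x], st.2 + (PySem.List.pyRange 1 ((st.1.length : Int) + 1) 1).foldl (fun p i => p * i) 1)
  else
    (st.1 ++ [x], st.2)

def solution (M : Int) (A : List Int) : Int :=
  let N : Int := A.length
  let st := (PySem.List.pyRange 0 N 1).foldl
    (fun st idx => stepA st (PySem.List.pyGetD A idx 0)) ([], 1)
  st.2 + (PySem.List.pyRange 1 ((st.1.length : Int) + 1) 1).foldl (fun p i => p * i) 1

-- ===== PORT B =====
-- B's recursive _fact
def bFact (n : Nat) : Int :=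
  match n with
  | 0 => 1
  | n + 1 => (n + 1 : Int) * bFact n

-- loop body of B's scan (state: seen set, current run length, lengths table)
def stepB (st : PySem.Set Int × Nat × List Nat) (x : Int) : PySem.Set Int × Nat × List Nat :=
  if x ∈ st.1 then
    ([x], 1, st.2.2 ++ [st.2.1])
  else
    (PySem.Set.add st.1 x, st.2.1 + 1, st.2.2)

def solution_alt (M : Int) (A : List Int) : Int :=
  let st := A.foldl stepB (PySem.Set.empty, 0, [])
  let lengths := st.2.2 ++ [st.2.1]
  1 + (lengths.map bFact).sum

-- ===== PRECONDITION & SPEC =====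
def Spec_solution (M : Int) (A : List Int) (out : Int) : Prop := out = solution_alt M A
instance (M : Int) (A : List Int) (out : Int) : Decidable (Spec_solution M A out) := by unfold Spec_solution; infer_instance

-- ===== CLAIM (what is proved, stated in full; the proofs are below) =====
def Claim_equal_solution : Prop := ∀ (M : Int) (A : List Int), Dom_solution M A → Spec_solution M A (solution M A)

-- ===== LEMMAS AND PROOFS =====

-- A's inner factorial loop computes bFact
lemma factLoop_eq (n : Nat) :
    (PySem.List.pyRange 1 ((n : Int) + 1) 1).foldl (fun p i => p * i) 1 = bFact n := by
  induction n with
  | zero => decide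
  | succ n ih =>
    rw [show ((n + 1 : Nat) : Int) + 1 = ((n : Int) + 1) + 1 by push_cast; ring,
        PySem.List.pyRange_one_succ_right (by omega), List.foldl_append, ih]
    simp [bFact]
    ring

-- loop invariant: same run elements, run length, and cnt = 1 + sum of factorials of lengths
lemma loop_inv (A : List Int) : ∀ (slc : List Int) (cnt : Int)
    (seen : PySem.Set Int) (run : Nat) (lengths : List Nat),
    (∀ y, y ∈ slc ↔ y ∈ seen) → run = slc.length → cnt = 1 + (lengths.map bFact).sum →
    (∀ y, y ∈ (A.foldl stepA (slc, cnt)).1 ↔ y ∈ (A.foldl stepB (seen, run, lengths)).1) ∧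
    (A.foldl stepB (seen, run, lengths)).2.1 = (A.foldl stepA (slc, cnt)).1.length ∧
    (A.foldl stepA (slc, cnt)).2 = 1 + ((A.foldl stepB (seen, run, lengths)).2.2.map bFact).sum := by
  induction A with
  | nil =>
    intro slc cnt seen run lengths hmem hrun hcnt
    exact ⟨hmem, hrun, hcnt⟩
  | cons x A ih =>
    intro slc cnt seen run lengths hmem hrun hcnt
    simp only [List.foldl_cons]
    by_cases hx : x ∈ slc
    · -- member branch: both reset to [x]; A adds the factorial, B records the length
      have hxs : x ∈ seen := (hmem x).1 hx
      have hne : slc.length ≠ 0 := by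
        intro h0; rw [List.length_eq_zero_iff] at h0; simp [h0] at hx
      rw [show stepA (slc, cnt) x
            = ([x], cnt + (PySem.List.pyRange 1 ((slc.length : Int) + 1) 1).foldl (fun p i => p * i) 1) by
            simp [stepA, hne, hx],
          show stepB (seen, run, lengths) x = ([x], 1, lengths ++ [run]) by simp [stepB, hxs]]
      refine ih [x] _ [x] 1 (lengths ++ [run]) (fun y => Iff.rfl) rfl ?_
      rw [factLoop_eq, hcnt, hrun]
      simp
      ring
    · -- fresh element: both extend the current run
      have hxs : x ∉ seen := fun h => hx ((hmem x).2 h)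
      have hA : stepA (slc, cnt) x = (slc ++ [x], cnt) := by
        by_cases h0 : slc.length = 0 <;> simp [stepA, h0, hx]
      rw [hA, show stepB (seen, run, lengths) x = (PySem.Set.add seen x, run + 1, lengths) by
            simp [stepB, hxs]]
      refine ih (slc ++ [x]) cnt (PySem.Set.add seen x) (run + 1) lengths ?_ (by simp [hrun]) hcnt
      intro y
      rw [PySem.Set.mem_add]
      simp [hmem y]

-- ===== VERDICT (by name: the statement is the Claim_ definition above) =====
theorem solution_spec : Claim_equal_solution := by
  intro M A _
  unfold Spec_solution solution solution_alt
  simp only []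
  rw [PySem.List.foldl_pyRange_zero_pyGetD' A 0 stepA ([], 1)]
  obtain ⟨-, h2, h3⟩ := loop_inv A [] 1 PySem.Set.empty 0 []
    (fun y => by simp [PySem.Set.empty]) rfl (by simp)
  rw [h3, ← h2, factLoop_eq]
  simp
  ring
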